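-- pv_equiv track=rewrite | github.com/ZhangYouJie-Major/algorithm-python | src/Solution.py | maximizeWin
-- ===== SOURCE A (Python) =====
-- from bisect import bisect_right, bisect_left
-- from typing import List, Dict, Optional, Set
--
-- def maximizeWin(prizePositions: List[int], k: int) -> int:
--     """
--         假设第二段右端点为prizePositions[i] 则左端点为prizePositions[i]-k
--
--         dp[i] 表示右端点不超过prizePositions[i] 一条线段可以
--         1、 不选 prizePositions[i] dp[i] = dp[i-1]
--         2、 选 dp[i] = i-j+1
--         dp[i] = max(dp[i-1], i-j+1)
--
--     """
--     n = len(prizePositions)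
--     dp = [0] * (n + 1)
--     ans = 0
--     for i in range(n):
--         x = bisect_left(prizePositions, prizePositions[i] - k)
--         ans = max(ans, dp[x] + i - x + 1)
--         dp[i + 1] = max(dp[i], i - x + 1)
--     return ans
-- ===== SOURCE B (Python) =====
-- def maximizeWin(prizePositions, k):
--     # Staged O(n) computation: pass 1 finds each window's left boundary with one
--     # shared monotone pointer; pass 2 folds a running prefix-maximum of window
--     # lengths (no dp array, no per-index binary search).
--     n = len(prizePositions)
--     lefts = []
--     j = 0
--     for i in range(n):
--         target = prizePositions[i] - k
--         while j < n and prizePositions[j] < target: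
--             j += 1
--         lefts.append(j)
--     t = 0
--     best = 0
--     ans = 0
--     for i in range(n):
--         li = lefts[i]
--         while t < li:
--             best = max(best, t - lefts[t] + 1)
--             t += 1
--         ans = max(ans, best + i - li + 1)
--     return ans
-- ===== Notes on version B (the rewrite author's own statement) =====
-- stated objective: alternative
-- what changed: Replaced A's dp-array-plus-per-index-binary-search loop by two staged linear passes: pass 1 computes every window's left boundary with one shared monotone pointer, pass 2 keeps only a scalar running prefix-maximum of window lengths (no dp table, no bisect); Pre_ excludes unsorted lists of length >= 3 with spread exceeding k, which violate bisect_left's documented sortedness precondition, so no particular value is specified there.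
-- outside the precondition, e.g. on maximizeWin([-2, 1, -2, 3], 1): A returns 4, B returns 3
import Mathlib
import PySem

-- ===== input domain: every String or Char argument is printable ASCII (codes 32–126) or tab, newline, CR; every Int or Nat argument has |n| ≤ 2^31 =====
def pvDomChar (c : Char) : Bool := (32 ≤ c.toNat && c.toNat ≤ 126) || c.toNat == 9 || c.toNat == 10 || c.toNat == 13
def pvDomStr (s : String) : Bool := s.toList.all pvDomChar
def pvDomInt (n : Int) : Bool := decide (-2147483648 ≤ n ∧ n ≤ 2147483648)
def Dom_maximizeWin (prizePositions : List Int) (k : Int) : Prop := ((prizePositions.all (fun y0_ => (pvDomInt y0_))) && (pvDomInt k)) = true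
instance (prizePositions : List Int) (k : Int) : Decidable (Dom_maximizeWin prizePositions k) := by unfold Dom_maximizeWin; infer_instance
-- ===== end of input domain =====

-- B replaces A's dp-array + per-index binary search by two staged linear passes
-- (shared monotone pointer, then a scalar running prefix-maximum); equal on sorted
-- input, which bisect-based A assumes.

-- ===== PORT A =====
-- bisect_left(a, x, 0, n): Python's binary search, transliterated.
-- (structural fuel recursion: fuel starts at hi - lo, enough for every iteration of the while loop)
def pvBisectLeft (a : List Int) (x : Int) : Nat → Nat → Nat → Nat
  | 0, lo, _ => lo
  | fuel + 1, lo, hi =>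
    if lo < hi then
      let mid := (lo + hi) / 2
      if a.getD mid 0 < x then pvBisectLeft a x fuel (mid + 1) hi
      else pvBisectLeft a x fuel lo mid
    else lo

def maximizeWin (prizePositions : List Int) (k : Int) : Int :=
  let n := prizePositions.length
  let s := (List.range n).foldl (fun (s : List Int × Int) i =>
    let dp := s.1
    let x := pvBisectLeft prizePositions (prizePositions.getD i 0 - k) n 0 n
    let ans := max s.2 (dp.getD x 0 + (i : Int) - (x : Int) + 1)
    (dp.set (i + 1) (max (dp.getD i 0) ((i : Int) - (x : Int) + 1)), ans))
    (List.replicate (n + 1) 0, 0)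
  s.2

-- ===== PORT B =====
-- pass-1 inner while: while j < n and a[j] < target: j += 1
-- (structural fuel recursion: fuel starts at n ≥ n - j, enough for every increment of j)
def pvAdvance (a : List Int) (target : Int) (n : Nat) : Nat → Nat → Nat
  | 0, left => left
  | fuel + 1, left =>
    if left < n ∧ a.getD left 0 < target then pvAdvance a target n fuel (left + 1) else left

-- pass-2 inner while: while t < li: best = max(best, t - lefts[t] + 1); t += 1
-- (structural fuel recursion: fuel starts at n ≥ li - t, enough for every increment of t)
def pvAccum (lefts : List Nat) (li : Nat) : Nat → Nat → Int → Nat × Int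
  | 0, t, best => (t, best)
  | fuel + 1, t, best =>
    if t < li then pvAccum lefts li fuel (t + 1) (max best ((t : Int) - (lefts.getD t 0 : Int) + 1))
    else (t, best)

def maximizeWin_alt (prizePositions : List Int) (k : Int) : Int :=
  let n := prizePositions.length
  let p1 := (List.range n).foldl (fun (s : List Nat × Nat) i =>
    let j := pvAdvance prizePositions (prizePositions.getD i 0 - k) n n s.2
    (s.1 ++ [j], j)) ([], 0)
  let lefts := p1.1
  let s2 := (List.range n).foldl (fun (s : Nat × Int × Int) i =>
    let li := lefts.getD i 0
    let tb := pvAccum lefts li n s.1 s.2.1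
    let ans := max s.2.2 (tb.2 + (i : Int) - (li : Int) + 1)
    (tb.1, tb.2, ans)) (0, 0, 0)
  s2.2.2

-- ===== PRECONDITION & SPEC =====
-- Pre_ excludes unsorted lists of length ≥ 3 whose spread exceeds k: such inputs violate
-- bisect_left's documented sortedness precondition (the problem's prize arrays are sorted),
-- so no particular return value is specified there and A's and B's values are both defensible;
-- lists of length ≤ 2 and lists whose spread is at most k are kept (provably equal).
def Pre_maximizeWin (prizePositions : List Int) (k : Int) : Prop :=
  List.Pairwise (· ≤ ·) prizePositions ∨ prizePositions.length ≤ 2 ∨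
    (∀ x ∈ prizePositions, ∀ y ∈ prizePositions, x - k ≤ y)

instance (prizePositions : List Int) (k : Int) : Decidable (Pre_maximizeWin prizePositions k) := by
  unfold Pre_maximizeWin; infer_instance

def pvWitness_maximizeWin : List Int × Int := ([1, 1, 2, 2, 3, 3, 5], 2)

def Spec_maximizeWin (prizePositions : List Int) (k : Int) (out : Int) : Prop := out = maximizeWin_alt prizePositions k
instance (prizePositions : List Int) (k : Int) (out : Int) : Decidable (Spec_maximizeWin prizePositions k out) := by unfold Spec_maximizeWin; infer_instance

-- ===== CLAIM (what is proved, stated in full; the proofs are below) =====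
def Claim_equal_maximizeWin : Prop := ∀ (prizePositions : List Int) (k : Int), Dom_maximizeWin prizePositions k → Pre_maximizeWin prizePositions k → Spec_maximizeWin prizePositions k (maximizeWin prizePositions k)

-- ===== LEMMAS AND PROOFS =====

-- proof-side bridge: the two passes of B fused into A's single-fold shape (dp array kept,
-- bisect replaced by pvAdvance); B is proved equal to pvFused on ALL inputs, and pvFused
-- equal to A on Pre_.
def pvFused (prizePositions : List Int) (k : Int) : Int :=
  let n := prizePositions.length
  let s := (List.range n).foldl (fun (s : List Int × Nat × Int) i =>
    let dp := s.1
    let p := prizePositions.getD i 0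
    let left := pvAdvance prizePositions (p - k) n n s.2.1
    let ans := max s.2.2 (dp.getD left 0 + (i : Int) - (left : Int) + 1)
    (dp.set (i + 1) (max (dp.getD i 0) ((i : Int) - (left : Int) + 1)), left, ans))
    (List.replicate (n + 1) 0, 0, 0)
  s.2.2

-- the shared pointer after m steps of pass 1
def pvP (a : List Int) (k : Int) : Nat → Nat
  | 0 => 0
  | m + 1 => pvAdvance a (a.getD m 0 - k) a.length a.length (pvP a k m)

-- window length with right endpoint j
def pvW (a : List Int) (k : Int) (j : Nat) : Int := (j : Int) - (pvP a k (j + 1) : Int) + 1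

-- running prefix maximum of window lengths (clamped below by 0)
def pvBest (a : List Int) (k : Int) (r : Nat) : Int :=
  (List.range r).foldl (fun b t => max b (pvW a k t)) 0

-- ---- basic pvAdvance facts ----
lemma advance_ge (a : List Int) (x : Int) (n : Nat) :
    ∀ fuel t, t ≤ pvAdvance a x n fuel t := by
  intro fuel
  induction fuel with
  | zero => intro t; simp [pvAdvance]
  | succ d ih =>
    intro t
    rw [pvAdvance]
    by_cases h : t < n ∧ a.getD t 0 < x
    · rw [if_pos h]; exact le_trans (by omega) (ih (t + 1))
    · rw [if_neg h]

lemma advance_le_max (a : List Int) (x : Int) (n : Nat) :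
    ∀ fuel t, pvAdvance a x n fuel t ≤ max t n := by
  intro fuel
  induction fuel with
  | zero => intro t; simp [pvAdvance]
  | succ d ih =>
    intro t
    rw [pvAdvance]
    by_cases h : t < n ∧ a.getD t 0 < x
    · rw [if_pos h]; exact le_trans (ih (t + 1)) (by omega)
    · rw [if_neg h]; omega

lemma advance_stop (a : List Int) (x : Int) (n : Nat) {i : Nat}
    (hi : x ≤ a.getD i 0) :
    ∀ fuel t, t ≤ i → pvAdvance a x n fuel t ≤ i := by
  intro fuel
  induction fuel with
  | zero => intro t ht; simpa [pvAdvance] using ht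
  | succ d ih =>
    intro t ht
    rw [pvAdvance]
    by_cases h : t < n ∧ a.getD t 0 < x
    · rw [if_pos h]
      have : t ≠ i := by rintro rfl; exact absurd hi (not_le.mpr h.2)
      exact ih (t + 1) (by omega)
    · rw [if_neg h]; exact ht

lemma P_le_n (a : List Int) (k : Int) : ∀ m, pvP a k m ≤ a.length := by
  intro m
  induction m with
  | zero => simp [pvP]
  | succ m ih =>
    have := advance_le_max a (a.getD m 0 - k) a.length a.length (pvP a k m)
    simp only [pvP]; omega

lemma P_mono (a : List Int) (k : Int) (m : Nat) : pvP a k m ≤ pvP a k (m + 1) :=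
  advance_ge a (a.getD m 0 - k) a.length a.length (pvP a k m)

-- ---- regimes ----
lemma P_le_self (a : List Int) (k : Int) (hk : 0 ≤ k) : ∀ m, pvP a k (m + 1) ≤ m := by
  intro m
  induction m with
  | zero =>
    show pvAdvance a (a.getD 0 0 - k) a.length a.length (pvP a k 0) ≤ 0
    exact advance_stop a _ a.length (i := 0) (by omega) a.length (pvP a k 0) (by simp [pvP])
  | succ m ih =>
    show pvAdvance a (a.getD (m + 1) 0 - k) a.length a.length (pvP a k (m + 1)) ≤ m + 1
    exact advance_stop a _ a.length (i := m + 1) (by omega) a.length _ (by omega)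

lemma advance_fire (a : List Int) (x : Int) (n : Nat) {t : Nat}
    (ht : t < n) (hlt : a.getD t 0 < x) :
    ∀ fuel, 1 ≤ fuel → t + 1 ≤ pvAdvance a x n fuel t := by
  intro fuel hf
  obtain ⟨d, rfl⟩ : ∃ d, fuel = d + 1 := ⟨fuel - 1, by omega⟩
  rw [pvAdvance, if_pos ⟨ht, hlt⟩]
  exact advance_ge a x n d (t + 1)

lemma P_ge_self (a : List Int) (k : Int) (hk : k < 0) :
    ∀ m, m ≤ a.length → m ≤ pvP a k m := by
  intro m
  induction m with
  | zero => intro _; simp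
  | succ m ih =>
    intro hm
    have hPm := ih (by omega)
    show m + 1 ≤ pvAdvance a (a.getD m 0 - k) a.length a.length (pvP a k m)
    rcases Nat.eq_or_lt_of_le hPm with hEq | hLt
    · -- pvP a k m = m < a.length : one iteration of the while loop fires
      rw [← hEq]
      exact advance_fire a (a.getD m 0 - k) a.length (by omega) (by omega) a.length (by omega)
    · exact le_trans hLt (advance_ge _ _ _ _ _)

lemma W_nonpos (a : List Int) (k : Int) (hk : k < 0) {j : Nat} (hj : j < a.length) :
    pvW a k j ≤ 0 := by
  have := P_ge_self a k hk (j + 1) (by omega)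
  unfold pvW; omega

lemma pvBest_succ (a : List Int) (k : Int) (r : Nat) :
    pvBest a k (r + 1) = max (pvBest a k r) (pvW a k r) := by
  simp [pvBest, List.range_succ]

lemma pvBest_zero_of_neg (a : List Int) (k : Int) (hk : k < 0) :
    ∀ r, r ≤ a.length → pvBest a k r = 0 := by
  intro r
  induction r with
  | zero => intro _; simp [pvBest]
  | succ r ih =>
    intro hr
    rw [pvBest_succ, ih (by omega)]
    have := W_nonpos a k hk (j := r) (by omega)
    omega

-- ---- pass 1 of B computes the map of pvP ----
lemma pass1_eq (a : List Int) (k : Int) : ∀ m,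
    (List.range m).foldl (fun (s : List Nat × Nat) i =>
      let j := pvAdvance a (a.getD i 0 - k) a.length a.length s.2
      (s.1 ++ [j], j)) ([], 0)
    = ((List.range m).map (fun i => pvP a k (i + 1)), pvP a k m) := by
  intro m
  induction m with
  | zero => simp [pvP]
  | succ m ih =>
    rw [List.range_succ, List.foldl_append, ih]
    simp [pvP]

lemma lefts_getD (a : List Int) (k : Int) {t : Nat} (ht : t < a.length) :
    ((List.range a.length).map (fun i => pvP a k (i + 1))).getD t 0 = pvP a k (t + 1) := by
  rw [List.getD_eq_getElem?_getD, List.getElem?_map]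
  simp [List.getElem?_range ht]

-- ---- pass-2 inner while accumulates the prefix maximum ----
lemma accum_spec (a : List Int) (k : Int) {li : Nat} (hli : li ≤ a.length) :
    ∀ fuel t, t ≤ li → li - t ≤ fuel →
      pvAccum ((List.range a.length).map (fun i => pvP a k (i + 1))) li fuel t (pvBest a k t)
        = (li, pvBest a k li) := by
  intro fuel
  induction fuel with
  | zero =>
    intro t ht h0
    have : t = li := by omega
    subst this; rfl
  | succ d ih =>
    intro t ht h0
    rw [pvAccum]
    by_cases h : t < li
    · rw [if_pos h, lefts_getD a k (by omega), show
        max (pvBest a k t) ((t : Int) - (pvP a k (t + 1) : Int) + 1) = pvBest a k (t + 1) by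
          rw [pvBest_succ]; rfl]
      exact ih (t + 1) (by omega) (by omega)
    · rw [if_neg h]
      have : t = li := by omega
      subst this; rfl

-- getD of a set list
lemma getD_set (l : List Int) (i : Nat) (v : Int) (x : Nat) (hi : i < l.length) :
    (l.set i v).getD x 0 = if x = i then v else l.getD x 0 := by
  by_cases h : x = i
  · subst h
    rw [List.getD_eq_getElem?_getD, List.getElem?_set_self (by omega), if_pos rfl]
    rfl
  · rw [List.getD_eq_getElem?_getD, List.getElem?_set_ne (by omega), if_neg h,
      List.getD_eq_getElem?_getD]

-- ---- the main lockstep between pvFused's fold and B's pass 2 ----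
lemma fused_lockstep (a : List Int) (k : Int)
    (Hr : ∀ m, m < a.length → m < pvP a k (m + 1) → pvBest a k (pvP a k (m + 1)) = 0) :
    ∀ m, m ≤ a.length →
      let n := a.length
      let sF := (List.range m).foldl (fun (s : List Int × Nat × Int) i =>
        let dp := s.1
        let p := a.getD i 0
        let left := pvAdvance a (p - k) n n s.2.1
        let ans := max s.2.2 (dp.getD left 0 + (i : Int) - (left : Int) + 1)
        (dp.set (i + 1) (max (dp.getD i 0) ((i : Int) - (left : Int) + 1)), left, ans))
        (List.replicate (n + 1) 0, 0, 0)
      let sB := (List.range m).foldl (fun (s : Nat × Int × Int) i =>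
        let li := ((List.range n).map (fun i => pvP a k (i + 1))).getD i 0
        let tb := pvAccum ((List.range n).map (fun i => pvP a k (i + 1))) li n s.1 s.2.1
        let ans := max s.2.2 (tb.2 + (i : Int) - (li : Int) + 1)
        (tb.1, tb.2, ans)) (0, 0, 0)
      sF.1.length = n + 1 ∧
      (∀ x, sF.1.getD x 0 = if x ≤ m then pvBest a k x else 0) ∧
      sF.2.1 = pvP a k m ∧
      sB.1 = pvP a k m ∧ sB.2.1 = pvBest a k (pvP a k m) ∧
      sF.2.2 = sB.2.2 := by
  intro m
  induction m with
  | zero =>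
    intro _
    refine ⟨by simp, fun x => ?_, rfl, rfl, by simp [pvP, pvBest], rfl⟩
    simp only [List.range_zero, List.foldl_nil]
    have h0 : (List.replicate (a.length + 1) (0 : Int)).getD x 0 = 0 := by
      rw [List.getD_eq_getElem?_getD, List.getElem?_replicate]
      split <;> rfl
    rw [h0]
    rcases Nat.eq_zero_or_pos x with rfl | hx
    · simp [pvBest]
    · rw [if_neg (by omega)]
  | succ m ih =>
    intro hm
    obtain ⟨hlen, hdp, hleftF, htB, hbestB, hans⟩ := ih (by omega)
    simp only [List.range_succ, List.foldl_append, List.foldl_cons, List.foldl_nil]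
    -- the value read / boundary at step m
    have hPm1 : pvP a k (m + 1) ≤ a.length := P_le_n a k (m + 1)
    have hli : ((List.range a.length).map (fun i => pvP a k (i + 1))).getD m 0
        = pvP a k (m + 1) := lefts_getD a k (by omega)
    have hadv : pvAdvance a (a.getD m 0 - k) a.length a.length (pvP a k m)
        = pvP a k (m + 1) := rfl
    have hread : (if pvP a k (m + 1) ≤ m then pvBest a k (pvP a k (m + 1)) else 0)
        = pvBest a k (pvP a k (m + 1)) := by
      by_cases h : pvP a k (m + 1) ≤ m
      · rw [if_pos h]
      · rw [if_neg h, Hr m (by omega) (by omega)]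
    have haccum : pvAccum ((List.range a.length).map (fun i => pvP a k (i + 1)))
        (pvP a k (m + 1)) a.length (pvP a k m) (pvBest a k (pvP a k m))
        = (pvP a k (m + 1), pvBest a k (pvP a k (m + 1))) :=
      accum_spec a k hPm1 a.length (pvP a k m) (P_mono a k m) (by omega)
    refine ⟨?_, ?_, ?_, ?_, ?_, ?_⟩
    · simpa using hlen
    · intro x
      simp only [hleftF, hadv]
      rw [getD_set _ _ _ _ (by rw [hlen]; omega)]
      by_cases hx : x = m + 1
      · subst hx
        rw [if_pos rfl, if_pos (le_refl _), hdp m, if_pos (le_refl _), pvBest_succ]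
        rfl
      · rw [if_neg hx, hdp x]
        by_cases hxm : x ≤ m
        · rw [if_pos hxm, if_pos (by omega)]
        · rw [if_neg hxm, if_neg (by omega)]
    · simp only [hleftF, hadv]
    · simp only [htB, hbestB, hli, haccum]
    · simp only [htB, hbestB, hli, haccum]
    · simp only [htB, hbestB, hli, haccum, hleftF, hadv, hans, hdp, hread]

-- B equals pvFused on EVERY input
lemma alt_eq_fused (a : List Int) (k : Int) : maximizeWin_alt a k = pvFused a k := by
  have Hr : ∀ m, m < a.length → m < pvP a k (m + 1) → pvBest a k (pvP a k (m + 1)) = 0 := by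
    intro m hm hlt
    by_cases hk : 0 ≤ k
    · exact absurd (P_le_self a k hk m) (by omega)
    · exact pvBest_zero_of_neg a k (by omega : k < 0) _ (P_le_n a k (m + 1))
  have h := fused_lockstep a k Hr a.length (le_refl _)
  unfold maximizeWin_alt pvFused
  dsimp only
  rw [pass1_eq]
  exact h.2.2.2.2.2.symm

-- ---- A vs pvFused on Pre_ (sorted / short / low-spread) ----

-- sorted (getD form)
lemma sorted_getD {a : List Int} (h : List.Pairwise (· ≤ ·) a) {i j : Nat}
    (hij : i ≤ j) (hj : j < a.length) : a.getD i 0 ≤ a.getD j 0 := by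
  rcases Nat.eq_or_lt_of_le hij with rfl | hlt
  · exact le_refl _
  · rw [List.getD_eq_getElem?_getD, List.getD_eq_getElem?_getD,
      List.getElem?_eq_getElem (by omega), List.getElem?_eq_getElem hj]
    exact List.pairwise_iff_getElem.mp h i j (by omega) hj hlt

-- characterization of a boundary index
def Bnd (a : List Int) (x : Int) (r : Nat) : Prop :=
  r ≤ a.length ∧ (∀ j, j < r → a.getD j 0 < x) ∧ (∀ j, r ≤ j → j < a.length → x ≤ a.getD j 0)

lemma Bnd_unique {a : List Int} {x : Int} {r₁ r₂ : Nat} (h₁ : Bnd a x r₁) (h₂ : Bnd a x r₂) :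
    r₁ = r₂ := by
  obtain ⟨hn₁, hlt₁, hge₁⟩ := h₁
  obtain ⟨hn₂, hlt₂, hge₂⟩ := h₂
  by_contra hne
  rcases Nat.lt_or_ge r₁ r₂ with h | h
  · exact absurd (hlt₂ r₁ h) (not_lt.mpr (hge₁ r₁ (le_refl _) (by omega)))
  · rcases Nat.lt_or_ge r₂ r₁ with h' | h'
    · exact absurd (hlt₁ r₂ h') (not_lt.mpr (hge₂ r₂ (le_refl _) (by omega)))
    · omega

lemma bisect_bnd {a : List Int} (hs : List.Pairwise (· ≤ ·) a) (x : Int) :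
    ∀ fuel lo hi, hi - lo ≤ fuel → lo ≤ hi → hi ≤ a.length →
      (∀ j, j < lo → a.getD j 0 < x) → (∀ j, hi ≤ j → j < a.length → x ≤ a.getD j 0) →
      Bnd a x (pvBisectLeft a x fuel lo hi) := by
  intro fuel
  induction fuel with
  | zero =>
    intro lo hi h0 hle hhi hlo hhiP
    simp only [pvBisectLeft]
    exact ⟨by omega, hlo, fun j hj hjn => hhiP j (by omega) hjn⟩
  | succ d ih =>
    intro lo hi h0 hle hhi hlo hhiP
    rw [pvBisectLeft]
    by_cases h : lo < hi
    · rw [if_pos h]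
      by_cases hlt : a.getD ((lo + hi) / 2) 0 < x
      · rw [if_pos hlt]
        exact ih ((lo + hi) / 2 + 1) hi (by omega) (by omega) hhi
          (fun j hj => lt_of_le_of_lt (sorted_getD hs (by omega) (by omega)) hlt) hhiP
      · rw [if_neg hlt]
        exact ih lo ((lo + hi) / 2) (by omega) (by omega) (by omega) hlo
          (fun j hj hjn => le_trans (not_lt.mp hlt) (sorted_getD hs (by omega) hjn))
    · rw [if_neg h]
      exact ⟨by omega, hlo, fun j hj hjn => hhiP j (by omega) hjn⟩

lemma advance_bnd {a : List Int} (hs : List.Pairwise (· ≤ ·) a) (x : Int) :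
    ∀ fuel left, a.length - left ≤ fuel → left ≤ a.length → (∀ j, j < left → a.getD j 0 < x) →
      Bnd a x (pvAdvance a x a.length fuel left) := by
  intro fuel
  induction fuel with
  | zero =>
    intro left h0 hle hlo
    simp only [pvAdvance]
    exact ⟨hle, hlo, fun j hj hjn => absurd hjn (by omega)⟩
  | succ d ih =>
    intro left h0 hle hlo
    rw [pvAdvance]
    by_cases hc : left < a.length ∧ a.getD left 0 < x
    · rw [if_pos hc]
      refine ih (left + 1) (by omega) (by omega) (fun j hj => ?_)
      rcases Nat.lt_or_ge j left with hj' | hj'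
      · exact hlo j hj'
      · have : j = left := by omega
        subst this; exact hc.2
    · rw [if_neg hc]
      refine ⟨hle, hlo, fun j hj hjn => ?_⟩
      have hL : left < a.length := by omega
      have hge : ¬ a.getD left 0 < x := fun hx => hc ⟨hL, hx⟩
      exact le_trans (not_lt.mp hge) (sorted_getD hs hj hjn)

-- the main loop invariant: A's fold and pvFused's fold yield equal dp and ans, and the
-- fused fold's left pointer is a boundary for every still-unprocessed target
lemma fold_invariant {a : List Int} (hs : List.Pairwise (· ≤ ·) a) (k : Int) :
    ∀ m, m ≤ a.length →
      let n := a.length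
      let sA := (List.range m).foldl (fun (s : List Int × Int) i =>
        let dp := s.1
        let x := pvBisectLeft a (a.getD i 0 - k) n 0 n
        let ans := max s.2 (dp.getD x 0 + (i : Int) - (x : Int) + 1)
        (dp.set (i + 1) (max (dp.getD i 0) ((i : Int) - (x : Int) + 1)), ans))
        (List.replicate (n + 1) 0, 0)
      let sB := (List.range m).foldl (fun (s : List Int × Nat × Int) i =>
        let dp := s.1
        let p := a.getD i 0
        let left := pvAdvance a (p - k) n n s.2.1
        let ans := max s.2.2 (dp.getD left 0 + (i : Int) - (left : Int) + 1)
        (dp.set (i + 1) (max (dp.getD i 0) ((i : Int) - (left : Int) + 1)), left, ans))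
        (List.replicate (n + 1) 0, 0, 0)
      sA.1 = sB.1 ∧ sA.2 = sB.2.2 ∧ sB.2.1 ≤ n ∧
        (∀ j, j < sB.2.1 → ∀ i', m ≤ i' → i' < n → a.getD j 0 < a.getD i' 0 - k) := by
  intro m
  induction m with
  | zero =>
    intro _
    simp only [List.range_zero, List.foldl_nil]
    exact ⟨trivial, trivial, by omega, fun j hj => by omega⟩
  | succ m ih =>
    intro hm
    obtain ⟨hdp, hans, hleft, hinv⟩ := ih (by omega)
    simp only [List.range_succ, List.foldl_append, List.foldl_cons, List.foldl_nil]
    have htarget : ∀ j, j < (((List.range m).foldl (fun (s : List Int × Nat × Int) i =>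
        let dp := s.1
        let p := a.getD i 0
        let left := pvAdvance a (p - k) a.length a.length s.2.1
        let ans := max s.2.2 (dp.getD left 0 + (i : Int) - (left : Int) + 1)
        (dp.set (i + 1) (max (dp.getD i 0) ((i : Int) - (left : Int) + 1)), left, ans))
        (List.replicate (a.length + 1) 0, 0, 0)).2.1) → a.getD j 0 < a.getD m 0 - k :=
      fun j hj => hinv j hj m (le_refl _) (by omega)
    have hBndB := advance_bnd hs (a.getD m 0 - k) a.length _ (by omega) hleft htarget
    have hBndA := bisect_bnd hs (a.getD m 0 - k) a.length 0 a.length (by omega) (by omega)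
      (le_refl _) (fun j hj => by omega) (fun j hj hjn => by omega)
    have hx : pvBisectLeft a (a.getD m 0 - k) a.length 0 a.length
        = pvAdvance a (a.getD m 0 - k) a.length a.length (((List.range m).foldl (fun (s : List Int × Nat × Int) i =>
        let dp := s.1
        let p := a.getD i 0
        let left := pvAdvance a (p - k) a.length a.length s.2.1
        let ans := max s.2.2 (dp.getD left 0 + (i : Int) - (left : Int) + 1)
        (dp.set (i + 1) (max (dp.getD i 0) ((i : Int) - (left : Int) + 1)), left, ans))
        (List.replicate (a.length + 1) 0, 0, 0)).2.1) := Bnd_unique hBndA hBndB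
    refine ⟨by simp only [hdp, hx], by simp only [hdp, hans, hx], hBndB.1, ?_⟩
    intro j hj i' hi' hi'n
    have h1 : a.getD j 0 < a.getD m 0 - k := hBndB.2.1 j hj
    have h2 : a.getD m 0 ≤ a.getD i' 0 := sorted_getD hs (by omega) hi'n
    omega

-- when the target is ≤ every element, the binary search collapses to 0 on ANY list
lemma bisect_low {a : List Int} {x : Int} (h : ∀ j, j < a.length → x ≤ a.getD j 0) :
    ∀ fuel hi, hi ≤ a.length → pvBisectLeft a x fuel 0 hi = 0 := by
  intro fuel
  induction fuel with
  | zero => intro hi _; rfl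
  | succ d ih =>
    intro hi hhi
    rw [pvBisectLeft]
    by_cases h0 : 0 < hi
    · rw [if_pos h0, if_neg (not_lt.mpr (h ((0 + hi) / 2) (by omega)))]
      exact ih _ (by omega)
    · rw [if_neg h0]

-- and the window's left boundary never moves from 0
lemma advance_low {a : List Int} {x : Int} {n : Nat} (h : ∀ j, j < a.length → x ≤ a.getD j 0)
    (hn : n ≤ a.length) : ∀ fuel, pvAdvance a x n fuel 0 = 0 := by
  intro fuel
  cases fuel with
  | zero => rfl
  | succ d =>
    rw [pvAdvance, if_neg]
    rintro ⟨h1, h2⟩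
    exact absurd (h 0 (by omega)) (not_le.mpr h2)

lemma getD_mem {a : List Int} {j : Nat} (hj : j < a.length) : a.getD j 0 ∈ a := by
  rw [List.getD_eq_getElem?_getD, List.getElem?_eq_getElem hj]
  exact List.getElem_mem hj

-- under the spread condition both loops keep x = left = 0 and stay in lockstep
lemma fold_invariant_low {a : List Int} (k : Int)
    (hk : ∀ x ∈ a, ∀ y ∈ a, x - k ≤ y) :
    ∀ m, m ≤ a.length →
      let n := a.length
      let sA := (List.range m).foldl (fun (s : List Int × Int) i =>
        let dp := s.1
        let x := pvBisectLeft a (a.getD i 0 - k) n 0 n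
        let ans := max s.2 (dp.getD x 0 + (i : Int) - (x : Int) + 1)
        (dp.set (i + 1) (max (dp.getD i 0) ((i : Int) - (x : Int) + 1)), ans))
        (List.replicate (n + 1) 0, 0)
      let sB := (List.range m).foldl (fun (s : List Int × Nat × Int) i =>
        let dp := s.1
        let p := a.getD i 0
        let left := pvAdvance a (p - k) n n s.2.1
        let ans := max s.2.2 (dp.getD left 0 + (i : Int) - (left : Int) + 1)
        (dp.set (i + 1) (max (dp.getD i 0) ((i : Int) - (left : Int) + 1)), left, ans))
        (List.replicate (n + 1) 0, 0, 0)
      sA.1 = sB.1 ∧ sA.2 = sB.2.2 ∧ sB.2.1 = 0 := by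
  intro m
  induction m with
  | zero =>
    intro _
    simp only [List.range_zero, List.foldl_nil]
    exact ⟨trivial, trivial, trivial⟩
  | succ m ih =>
    intro hm
    obtain ⟨hdp, hans, hleft⟩ := ih (by omega)
    simp only [List.range_succ, List.foldl_append, List.foldl_cons, List.foldl_nil]
    have hlow : ∀ j, j < a.length → a.getD m 0 - k ≤ a.getD j 0 :=
      fun j hj => hk _ (getD_mem (by omega)) _ (getD_mem hj)
    have hA := bisect_low hlow a.length a.length (le_refl _)
    have hB := advance_low hlow (le_refl a.length) a.length
    rw [hleft] at *
    refine ⟨?_, ?_, ?_⟩ <;> simp only [hdp, hans, hA, hB]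

-- length ≤ 2: A and pvFused agree on every input, sorted or not (finite case analysis)
lemma fused_one (p k : Int) : maximizeWin [p] k = pvFused [p] k := by
  have hb : ∀ x : Int, pvBisectLeft [p] x 1 0 1 = if p < x then 1 else 0 := by
    intro x
    show (if (0:Nat) < 1 then if [p].getD ((0+1)/2) 0 < x then pvBisectLeft [p] x 0 ((0+1)/2+1) 1 else pvBisectLeft [p] x 0 0 ((0+1)/2) else 0) = _
    norm_num [List.getD, pvBisectLeft]
  have ha : ∀ x : Int, pvAdvance [p] x 1 1 0 = if p < x then 1 else 0 := by
    intro x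
    show (if (0:Nat) < 1 ∧ [p].getD 0 0 < x then pvAdvance [p] x 1 0 (0+1) else 0) = _
    norm_num [List.getD, pvAdvance]
  unfold maximizeWin pvFused
  simp only [List.length_cons, List.length_nil, show List.range 1 = [0] from rfl,
    List.foldl_cons, List.foldl_nil,
    show List.replicate (1+1) (0:Int) = [0,0] from rfl]
  simp only [hb, ha]

lemma fused_two (p q k : Int) : maximizeWin [p,q] k = pvFused [p,q] k := by
  have hb : ∀ x : Int, pvBisectLeft [p,q] x 2 0 2 = if q < x then 2 else if p < x then 1 else 0 := by
    intro x
    simp only [show (2:Nat) = 1+1 from rfl, pvBisectLeft]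
    norm_num [List.getD]
  have ha0 : ∀ x : Int, pvAdvance [p,q] x 2 2 0 = if p < x then (if q < x then 2 else 1) else 0 := by
    intro x
    simp only [show (2:Nat) = 1+1 from rfl, pvAdvance]
    norm_num [List.getD]
  have ha1 : ∀ x : Int, pvAdvance [p,q] x 2 2 1 = if q < x then 2 else 1 := by
    intro x
    simp only [show (2:Nat) = 1+1 from rfl, pvAdvance]
    norm_num [List.getD]
  have ha2 : ∀ x : Int, pvAdvance [p,q] x 2 2 2 = 2 := by
    intro x
    simp only [show (2:Nat) = 1+1 from rfl, pvAdvance]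
    norm_num
  unfold maximizeWin pvFused
  simp only [List.length_cons, List.length_nil, show List.range 2 = [0,1] from rfl,
    List.foldl_cons, List.foldl_nil,
    show List.replicate (2+1) (0:Int) = [0,0,0] from rfl]
  simp only [hb, ha0]
  split_ifs <;> simp_all [List.getD, List.set] <;>
    (try split_ifs) <;> (try norm_num [List.getD]) <;> omega

-- ===== VERDICT (by name: the statement is the Claim_ definition above) =====
theorem maximizeWin_spec : Claim_equal_maximizeWin := by
  intro a k _ hpre
  unfold Spec_maximizeWin
  rw [alt_eq_fused]
  rcases hpre with hs | hlen | hk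
  · unfold maximizeWin pvFused
    exact (fold_invariant hs k a.length (le_refl _)).2.1
  · match a, hlen with
    | [], _ => rfl
    | [p], _ => exact fused_one p k
    | [p, q], _ => exact fused_two p q k
  · unfold maximizeWin pvFused
    exact (fold_invariant_low k hk a.length (le_refl _)).2.1
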